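-- pv_equiv track=rewrite | github.com/JaeHyeok-Han/Algorithm | PROGRAMMERS/주식 가격.py | solution
-- ===== SOURCE A (Python) =====
-- def solution(prices):
--     answer = [-1] * len(prices)
--     stack = []
--     for i, price in enumerate(prices):
--         while stack and stack[len(stack) - 1][0] > price:
--             temp = stack.pop()
--             answer[temp[1]] = i - temp[1]
--         stack.append([price, i])
--     while stack:
--         temp = stack.pop()
--         answer[temp[1]] = (len(prices) - 1) - temp[1]
--     return answer
-- ===== SOURCE B (Python) =====
-- def solution(prices):
--     n = len(prices)
--     answer = []
--     for i in range(n):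
--         c = 0
--         for j in range(i + 1, n):
--             c += 1
--             if prices[i] > prices[j]:
--                 break
--         answer.append(c)
--     return answer
-- ===== Notes on version B (the rewrite author's own statement) =====
-- stated objective: simpler
-- what changed: Replaced the monotonic stack with in-place answer updates by a direct per-index forward scan that counts steps until the first strict drop.
import Mathlib
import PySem

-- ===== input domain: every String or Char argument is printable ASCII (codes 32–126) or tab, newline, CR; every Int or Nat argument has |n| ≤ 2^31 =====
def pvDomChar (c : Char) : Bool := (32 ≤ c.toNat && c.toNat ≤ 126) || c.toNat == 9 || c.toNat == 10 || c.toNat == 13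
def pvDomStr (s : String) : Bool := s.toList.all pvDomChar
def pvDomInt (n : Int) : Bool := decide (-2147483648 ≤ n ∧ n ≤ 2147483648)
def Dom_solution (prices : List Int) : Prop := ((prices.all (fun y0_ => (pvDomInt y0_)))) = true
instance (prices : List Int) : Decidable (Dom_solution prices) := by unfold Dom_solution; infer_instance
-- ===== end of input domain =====

-- B replaces A's monotonic stack by a direct per-index forward scan counting steps to the first strict drop (simpler; not faster).

-- ===== PORT A =====
-- the inner `while stack and stack[-1][0] > price` loop: pops entries, writing answer[k] := i - k
def popLoop (price : Int) (i : Nat) (answer : List Int) (stack : List (Int × Nat)) :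
    List Int × List (Int × Nat) :=
  match stack with
  | [] => (answer, [])
  | (p, k) :: rest =>
      if price < p then popLoop price i (answer.set k ((i : Int) - (k : Int))) rest
      else (answer, (p, k) :: rest)

-- the `for i, price in enumerate(prices)` loop (suf = remaining prices, i = current index),
-- followed by the final drain `while stack: answer[k] := (n-1) - k`
def mainLoop (n : Nat) (i : Nat) (suf : List Int) (answer : List Int)
    (stack : List (Int × Nat)) : List Int :=
  match suf with
  | [] => stack.foldl (fun a e => a.set e.2 ((n : Int) - 1 - (e.2 : Int))) answer
  | price :: rest =>
      let s := popLoop price i answer stack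
      mainLoop n (i + 1) rest s.1 ((price, i) :: s.2)

def solution (prices : List Int) : List Int :=
  mainLoop prices.length 0 prices (List.replicate prices.length (-1)) []

-- ===== PORT B =====
-- `_drop_count(p, rest)`: walk rest, adding 1 per step, stopping at the first q with p > q
def dropCount (p : Int) (rest : List Int) : Int :=
  match rest with
  | [] => 0
  | q :: t => if p > q then 1 else 1 + dropCount p t

-- the comprehension: for each position, _drop_count of that element against the rest
def solution_alt (prices : List Int) : List Int :=
  match prices with
  | [] => []
  | p :: t => dropCount p t :: solution_alt t

-- ===== PRECONDITION & SPEC =====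
def Spec_solution (prices : List Int) (out : List Int) : Prop := out = solution_alt prices
instance (prices : List Int) (out : List Int) : Decidable (Spec_solution prices out) := by unfold Spec_solution; infer_instance

-- ===== CLAIM (what is proved, stated in full; the proofs are below) =====
def Claim_equal_solution : Prop := ∀ (prices : List Int), Dom_solution prices → Spec_solution prices (solution prices)

-- ===== LEMMAS AND PROOFS =====

-- index (in `suf`) of the first element strictly below s, if any
def firstGt (s : Int) : List Int → Option Nat
  | [] => none
  | q :: rest => if s > q then some 0 else (firstGt s rest).map (· + 1)

-- the value A eventually writes for a stack entry (s, k) given remaining input suf at index i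
def finishVal (n i : Nat) (s : Int) (suf : List Int) (k : Nat) : Int :=
  match firstGt s suf with
  | some j => (i : Int) + j - k
  | none => (n : Int) - 1 - (k : Int)

-- the answers A writes for the still-unprocessed positions themselves
def writeSuf (i : Nat) (suf : List Int) (answer : List Int) : List Int :=
  match suf with
  | [] => answer
  | q :: rest => writeSuf (i + 1) rest (answer.set i (dropCount q rest))

lemma dropWhile_head_false {α : Type} (p : α → Bool) (l : List α) (h0 : α) (t0 : List α)
    (h : l.dropWhile p = h0 :: t0) : p h0 = false := by
  induction l with
  | nil => simp [List.dropWhile] at h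
  | cons a l ih =>
      rw [List.dropWhile_cons] at h
      by_cases hp : p a
      · exact ih (by simpa [hp] using h)
      · obtain ⟨rfl, -⟩ := by simpa [hp] using h
        simpa using hp

lemma dropCount_eq_firstGt (p : Int) (t : List Int) :
    dropCount p t = (match firstGt p t with
      | some j => (j : Int) + 1
      | none => (t.length : Int)) := by
  induction t with
  | nil => simp [dropCount, firstGt]
  | cons q r ih =>
      simp only [dropCount, firstGt]
      split_ifs with h
      · simp
      · rw [ih]
        cases hf : firstGt p r <;> simp [hf] <;> ring

lemma popLoop_eq (price : Int) (i : Nat) (answer : List Int) (stack : List (Int × Nat)) :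
    popLoop price i answer stack =
      ((stack.takeWhile (fun e => decide (price < e.1))).foldl
          (fun a e => a.set e.2 ((i : Int) - (e.2 : Int))) answer,
        stack.dropWhile (fun e => decide (price < e.1))) := by
  induction stack generalizing answer with
  | nil => simp [popLoop]
  | cons e rest ih =>
      obtain ⟨p, k⟩ := e
      by_cases h : price < p <;>
        simp [popLoop, h, ih]

lemma writeSuf_set (j : Nat) (suf : List Int) (a : List Int) (k : Nat) (x : Int)
    (hk : k < j) : writeSuf j suf (a.set k x) = (writeSuf j suf a).set k x := by
  induction suf generalizing j a with
  | nil => simp [writeSuf]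
  | cons q r ih =>
      simp only [writeSuf]
      rw [List.set_comm _ _ (Nat.ne_of_lt hk), ih (j + 1) _ (Nat.lt_succ_of_lt hk)]

lemma writeSuf_foldl_set (j : Nat) (suf : List Int) (l : List (Int × Nat))
    (f : (Int × Nat) → Int) (a : List Int) (hl : ∀ e ∈ l, e.2 < j) :
    writeSuf j suf (l.foldl (fun a e => a.set e.2 (f e)) a) =
      l.foldl (fun a e => a.set e.2 (f e)) (writeSuf j suf a) := by
  induction l generalizing a with
  | nil => rfl
  | cons e t ih =>
      simp only [List.foldl_cons]
      rw [ih _ (fun x hx => hl x (List.mem_cons_of_mem _ hx)),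
        writeSuf_set _ _ _ _ _ (hl e (List.mem_cons_self))]

lemma set_foldl_comm (l : List (Int × Nat)) (f : (Int × Nat) → Int) (a : List Int)
    (k : Nat) (v : Int) (hl : ∀ e ∈ l, e.2 ≠ k) :
    (l.foldl (fun a e => a.set e.2 (f e)) a).set k v =
      l.foldl (fun a e => a.set e.2 (f e)) (a.set k v) := by
  induction l generalizing a with
  | nil => rfl
  | cons e t ih =>
      simp only [List.foldl_cons]
      rw [ih _ (fun x hx => hl x (List.mem_cons_of_mem _ hx)),
        List.set_comm _ _ (hl e (List.mem_cons_self))]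

lemma foldl_set_congr (l : List (Int × Nat)) (f g : (Int × Nat) → Int) (a : List Int)
    (h : ∀ e ∈ l, f e = g e) :
    l.foldl (fun a e => a.set e.2 (f e)) a = l.foldl (fun a e => a.set e.2 (g e)) a := by
  induction l generalizing a with
  | nil => rfl
  | cons e t ih =>
      simp only [List.foldl_cons]
      rw [h e (List.mem_cons_self), ih _ (fun x hx => h x (List.mem_cons_of_mem _ hx))]

lemma main_eq (n : Nat) (suf : List Int) : ∀ (i : Nat) (answer : List Int)
    (stack : List (Int × Nat)), i + suf.length = n →
    (∀ e ∈ stack, e.2 < i) →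
    stack.Pairwise (fun a b => b.1 ≤ a.1) →
    mainLoop n i suf answer stack =
      stack.foldl (fun a e => a.set e.2 (finishVal n i e.1 suf e.2))
        (writeSuf i suf answer) := by
  induction suf with
  | nil =>
      intro i answer stack _ _ _
      simp only [mainLoop, writeSuf]
      exact foldl_set_congr _ _ _ _ (fun e _ => by simp [finishVal, firstGt])
  | cons q rest ih =>
      intro i answer stack hn hlt hpw
      simp only [mainLoop, popLoop_eq]
      set P : (Int × Nat) → Bool := fun e => decide (q < e.1) with hP
      have hkept_le : ∀ e ∈ stack.dropWhile P, e.1 ≤ q := by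
        intro e he
        rcases hd : stack.dropWhile P with _ | ⟨h0, t0⟩
        · rw [hd] at he; simp at he
        · have hh0 : ¬ (q < h0.1) := by
            have := dropWhile_head_false P stack h0 t0 hd
            simpa [hP] using this
          rw [hd] at he
          rcases List.mem_cons.mp he with rfl | he'
          · exact le_of_not_gt hh0
          · have hsub : List.Sublist (stack.dropWhile P) stack := List.dropWhile_sublist P
            have hpw' := hpw.sublist (hd ▸ hsub)
            exact le_trans (List.rel_of_pairwise_cons hpw' he') (le_of_not_gt hh0)
      have hkept_lt : ∀ e ∈ stack.dropWhile P, e.2 < i :=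
        fun e he => hlt e ((List.dropWhile_sublist P).mem he)
      have hstep := ih (i + 1)
        ((stack.takeWhile P).foldl (fun a e => a.set e.2 ((i : Int) - (e.2 : Int))) answer)
        ((q, i) :: stack.dropWhile P)
        (by simp only [List.length_cons] at hn; omega)
        (by
          intro e he
          rcases List.mem_cons.mp he with rfl | he'
          · exact Nat.lt_succ_self i
          · exact Nat.lt_succ_of_lt (hkept_lt e he'))
        (by
          refine List.pairwise_cons.mpr ⟨fun b hb => hkept_le b hb, ?_⟩
          exact hpw.sublist (List.dropWhile_sublist P))
      rw [hstep]
      -- now both sides are folds; rearrange the right-hand side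
      simp only [writeSuf, List.foldl_cons]
      -- split stack on the RHS into takeWhile ++ dropWhile
      conv_rhs => rw [← List.takeWhile_append_dropWhile (p := P) (l := stack)]
      rw [List.foldl_append]
      -- popped entries write i - k on both sides
      have hpop : ∀ e ∈ stack.takeWhile P,
          finishVal n i e.1 (q :: rest) e.2 = (i : Int) - (e.2 : Int) := by
        intro e he
        have : q < e.1 := by
          have := List.mem_takeWhile_imp he
          simpa [hP] using this
        simp [finishVal, firstGt, this]
      -- kept entries: finishVal shifts by one position
      have hkeep : ∀ e ∈ stack.dropWhile P,
          finishVal n i e.1 (q :: rest) e.2 = finishVal n (i + 1) e.1 rest e.2 := by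
        intro e he
        have hle : ¬ (e.1 > q) := not_lt.mpr (hkept_le e he)
        simp only [finishVal, firstGt, if_neg hle]
        cases hf : firstGt e.1 rest <;> simp [hf] <;> ring
      -- the value written for the new entry (q, i)
      have hq : dropCount q rest = finishVal n (i + 1) q rest i := by
        rw [dropCount_eq_firstGt]
        have hnn : i + 1 + rest.length = n := by
          simp only [List.length_cons] at hn; omega
        unfold finishVal
        cases hf : firstGt q rest with
        | some j => simp only [hf]; push_cast; ring
        | none => simp only [hf]; omega
      rw [foldl_set_congr _ _ _ _ hpop, foldl_set_congr _ _ _ _ hkeep, hq]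
      rw [writeSuf_foldl_set _ _ _ _ _ (by
        intro e he
        exact Nat.lt_succ_of_lt (hlt e ((List.takeWhile_sublist P).mem he)))]
      rw [set_foldl_comm _ _ _ _ _ (by
        intro e he
        exact Nat.ne_of_lt (hlt e ((List.takeWhile_sublist P).mem he)))]
      rw [writeSuf_set _ _ _ _ _ (Nat.lt_succ_self i)]

lemma writeSuf_eq (suf : List Int) : ∀ (pre rest : List Int), rest.length = suf.length →
    writeSuf pre.length suf (pre ++ rest) = pre ++ solution_alt suf := by
  induction suf with
  | nil => intro pre rest h; simp [writeSuf, solution_alt, List.length_eq_zero_iff.mp h]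
  | cons q r ih =>
      intro pre rest h
      cases rest with
      | nil => simp at h
      | cons x rest' =>
          simp only [writeSuf, solution_alt]
          have hset : (pre ++ x :: rest').set pre.length (dropCount q r)
              = (pre ++ [dropCount q r]) ++ rest' := by
            rw [List.set_append_right _ _ (Nat.le_refl _)]
            simp
          rw [hset]
          have := ih (pre ++ [dropCount q r]) rest' (by simpa using h)
          simpa using this

-- ===== VERDICT (by name: the statement is the Claim_ definition above) =====
theorem solution_spec : Claim_equal_solution := by
  intro prices _
  unfold Spec_solution solution
  rw [main_eq prices.length prices 0 _ [] (by simp) (by simp) (by simp)]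
  simpa using writeSuf_eq prices [] (List.replicate prices.length (-1)) (by simp)
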